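-- pv_equiv track=rewrite | github.com/Sunxy11/Projects | KHET/KHET/khet_path.py | fire_laser
-- ===== SOURCE A (Python) =====
-- def fire_laser(pla,flag,_line,_colum,laserposition,l):   #flag是发射激光得那个棋子或着转折点转发激光的那个棋子,后面分别是棋子的行和列,激光方向  l是一个装经过格子的list
--     if laserposition == 3:#看激光方向
--         a=0
--         for i in range(_line,8):
--             l[i][_colum] = 1
--             a+=1
--             if a == 8 - _line and pla[7][_colum]%100 == 0:
--                 return   pla[i][_colum],i, _colum, laserposition,l
--             elif pla[i][_colum]%100 != 0 and i != _line:
--                 return   pla[i][_colum],i, _colum, laserposition,l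
--             else:
--                 continue
--     if laserposition == 1:
--         a = 0
--         for i in range(_line,-1,-1):
--             l[i][_colum] = 1
--             a += 1
--             if a == _line+1 and pla[0][_colum]%100 == 0:
--                 return   pla[i][_colum], i, _colum, laserposition,l
--             elif pla[i][_colum]%100 != 0 and i!=_line:
--                 return   pla[i][_colum],i, _colum, laserposition,l
--             else:
--                 continue
--     if laserposition == 4:
--         a = 0
--         for i in range(_colum,10):
--             a += 1
--             l[_line][i] = 1
--             if a == 10-_colum and pla[_line][9]%100 == 0:
--                 return  pla[_line][i],_line, i, laserposition,l
--             elif pla[_line][i]%100 != 0 and i != _colum: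
--                 return  pla[_line][i], _line, i, laserposition,l
--             else:
--                 continue
--     if laserposition == 2:
--         a = 0
--         for i in range(_colum,-1,-1):
--
--             l[_line][i] = 1
--             a += 1
--             if a == _colum+1 and pla[_line][0]%100 == 0:
--                 return pla[_line][i], _line, i, laserposition,l
--             elif pla[_line][i]%100 != 0 and i != _colum:
--                 return pla[_line][i] , _line, i, laserposition,l #返回被激光射到的棋子的值，棋子的位置，还有激光的方向
--             else:
--                 continue
-- ===== SOURCE B (Python) =====
-- def fire_laser(pla, flag, _line, _colum, laserposition, l):
--     vec = {1: (-1, 0), 2: (0, -1), 3: (1, 0), 4: (0, 1)}.get(laserposition)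
--     if vec is None:
--         return None
--     di, dj = vec
--     n = (8 - _line if di > 0 else _line + 1) if di != 0 else (10 - _colum if dj > 0 else _colum + 1)
--     # phase 1: scan (read-only) for the stopping step, if any
--     hit = None
--     for k in range(n):
--         r, c = _line + k * di, _colum + k * dj
--         if (k > 0 and pla[r][c] % 100 != 0) or (k == n - 1 and pla[r][c] % 100 == 0):
--             hit = k
--             break
--     # phase 2: mark the traversed cells
--     last = n - 1 if hit is None else hit
--     for k in range(last + 1):
--         l[_line + k * di][_colum + k * dj] = 1
--     if hit is None:
--         return None
--     r, c = _line + hit * di, _colum + hit * dj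
--     return pla[r][c], r, c, laserposition, l
-- ===== Notes on version B (the rewrite author's own statement) =====
-- stated objective: simpler
-- what changed: Replaces A's four direction-specific loops (each interleaving marking with a step counter 'a' and a separate boundary-cell lookup) by one parameterized delta sweep decomposed into two phases: a read-only scan that locates the stopping step, then a marking pass over the traversed prefix.
import Mathlib
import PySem

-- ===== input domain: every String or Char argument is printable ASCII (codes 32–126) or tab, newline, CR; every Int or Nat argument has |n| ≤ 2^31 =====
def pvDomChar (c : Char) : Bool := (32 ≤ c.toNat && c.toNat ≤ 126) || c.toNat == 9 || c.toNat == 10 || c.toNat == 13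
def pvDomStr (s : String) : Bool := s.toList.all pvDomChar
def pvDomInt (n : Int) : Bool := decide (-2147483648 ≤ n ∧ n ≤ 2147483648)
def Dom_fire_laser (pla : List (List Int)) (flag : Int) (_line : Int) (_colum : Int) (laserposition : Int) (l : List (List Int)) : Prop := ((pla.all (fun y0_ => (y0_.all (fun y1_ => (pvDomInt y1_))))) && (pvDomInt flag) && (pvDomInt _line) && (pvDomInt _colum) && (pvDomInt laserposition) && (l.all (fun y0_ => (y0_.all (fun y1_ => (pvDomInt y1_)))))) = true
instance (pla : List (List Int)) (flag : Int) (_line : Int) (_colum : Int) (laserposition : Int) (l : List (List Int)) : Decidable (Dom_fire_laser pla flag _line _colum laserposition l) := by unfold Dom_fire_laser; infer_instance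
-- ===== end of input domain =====

-- B replaces A's four direction-specific marking loops by one parameterized sweep split into a
-- read-only scan for the stopping step followed by a marking pass ('simpler' decomposition).
-- Both Pythons mutate the rows of `l` in place identically; the equivalence proved is about the
-- returned value (which contains the marked `l`).

-- shared primitives: pla[r][c] (in range under Pre_) and the assignment l[r][c] = 1
def pvCell (pla : List (List Int)) (r c : Int) : Int :=
  PySem.List.pyGetD (PySem.List.pyGetD pla r []) c 0

def pvMark (l : List (List Int)) (r c : Int) : List (List Int) :=
  PySem.List.pySetD l r (PySem.List.pySetD (PySem.List.pyGetD l r []) c 1)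

-- ===== PORT A =====
-- one helper per Python `for` loop, recursing on the range list with the counter `a` and `l`

def pvLoop3 (pla : List (List Int)) (_line _colum lp : Int) :
    List Int → Int → List (List Int) → Option (Int × Int × Int × Int × List (List Int))
  | [], _, _ => none
  | i :: rest, a, l =>
    let l' := pvMark l i _colum
    let a' := a + 1
    if a' = 8 - _line ∧ PySem.Int.mod (pvCell pla 7 _colum) 100 = 0 then
      some (pvCell pla i _colum, i, _colum, lp, l')
    else if PySem.Int.mod (pvCell pla i _colum) 100 ≠ 0 ∧ i ≠ _line then
      some (pvCell pla i _colum, i, _colum, lp, l')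
    else pvLoop3 pla _line _colum lp rest a' l'

def pvLoop1 (pla : List (List Int)) (_line _colum lp : Int) :
    List Int → Int → List (List Int) → Option (Int × Int × Int × Int × List (List Int))
  | [], _, _ => none
  | i :: rest, a, l =>
    let l' := pvMark l i _colum
    let a' := a + 1
    if a' = _line + 1 ∧ PySem.Int.mod (pvCell pla 0 _colum) 100 = 0 then
      some (pvCell pla i _colum, i, _colum, lp, l')
    else if PySem.Int.mod (pvCell pla i _colum) 100 ≠ 0 ∧ i ≠ _line then
      some (pvCell pla i _colum, i, _colum, lp, l')
    else pvLoop1 pla _line _colum lp rest a' l'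

def pvLoop4 (pla : List (List Int)) (_line _colum lp : Int) :
    List Int → Int → List (List Int) → Option (Int × Int × Int × Int × List (List Int))
  | [], _, _ => none
  | i :: rest, a, l =>
    let a' := a + 1
    let l' := pvMark l _line i
    if a' = 10 - _colum ∧ PySem.Int.mod (pvCell pla _line 9) 100 = 0 then
      some (pvCell pla _line i, _line, i, lp, l')
    else if PySem.Int.mod (pvCell pla _line i) 100 ≠ 0 ∧ i ≠ _colum then
      some (pvCell pla _line i, _line, i, lp, l')
    else pvLoop4 pla _line _colum lp rest a' l'

def pvLoop2 (pla : List (List Int)) (_line _colum lp : Int) :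
    List Int → Int → List (List Int) → Option (Int × Int × Int × Int × List (List Int))
  | [], _, _ => none
  | i :: rest, a, l =>
    let l' := pvMark l _line i
    let a' := a + 1
    if a' = _colum + 1 ∧ PySem.Int.mod (pvCell pla _line 0) 100 = 0 then
      some (pvCell pla _line i, _line, i, lp, l')
    else if PySem.Int.mod (pvCell pla _line i) 100 ≠ 0 ∧ i ≠ _colum then
      some (pvCell pla _line i, _line, i, lp, l')
    else pvLoop2 pla _line _colum lp rest a' l'

def fire_laser (pla : List (List Int)) (flag : Int) (_line : Int) (_colum : Int) (laserposition : Int) (l : List (List Int)) : Option (Int × Int × Int × Int × List (List Int)) :=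
  if laserposition = 3 then
    pvLoop3 pla _line _colum laserposition (PySem.List.pyRange _line 8 1) 0 l
  else if laserposition = 1 then
    pvLoop1 pla _line _colum laserposition (PySem.List.pyRange _line (-1) (-1)) 0 l
  else if laserposition = 4 then
    pvLoop4 pla _line _colum laserposition (PySem.List.pyRange _colum 10 1) 0 l
  else if laserposition = 2 then
    pvLoop2 pla _line _colum laserposition (PySem.List.pyRange _colum (-1) (-1)) 0 l
  else none

-- ===== PORT B =====
-- phase 1 of Source B: read-only scan over k = 0..n-1 for the stopping step
def pvFindHit (pla : List (List Int)) (_line _colum di dj n : Int) : List Int → Option Int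
  | [] => none
  | k :: rest =>
    if (k > 0 ∧ PySem.Int.mod (pvCell pla (_line + k * di) (_colum + k * dj)) 100 ≠ 0) ∨
       (k = n - 1 ∧ PySem.Int.mod (pvCell pla (_line + k * di) (_colum + k * dj)) 100 = 0) then
      some k
    else pvFindHit pla _line _colum di dj n rest

def fire_laser_alt (pla : List (List Int)) (flag : Int) (_line : Int) (_colum : Int) (laserposition : Int) (l : List (List Int)) : Option (Int × Int × Int × Int × List (List Int)) :=
  let vec? : Option (Int × Int) :=
    if laserposition = 1 then some (-1, 0)
    else if laserposition = 2 then some (0, -1)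
    else if laserposition = 3 then some (1, 0)
    else if laserposition = 4 then some (0, 1)
    else none
  match vec? with
  | none => none
  | some (di, dj) =>
    let n : Int := if di ≠ 0 then (if di > 0 then 8 - _line else _line + 1)
                   else (if dj > 0 then 10 - _colum else _colum + 1)
    let hit? := pvFindHit pla _line _colum di dj n (PySem.List.pyRange 0 n 1)
    let last : Int := match hit? with | none => n - 1 | some k => k
    -- phase 2 of Source B: mark the traversed cells
    let l' := (PySem.List.pyRange 0 (last + 1) 1).foldl
        (fun acc k => pvMark acc (_line + k * di) (_colum + k * dj)) l
    match hit? with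
    | none => none
    | some k =>
      some (pvCell pla (_line + k * di) (_colum + k * dj), _line + k * di, _colum + k * dj,
            laserposition, l')

-- ===== PRECONDITION & SPEC =====
-- Pre_ restricts, when laserposition names a real direction 1–4 and its sweep is non-empty, to
-- the game's natural domain: an 8×10 board (pla and l) with the start square on it; excluded
-- inputs are those where Python A raises IndexError on a board that is not 8×10 or relies on
-- accidental negative-index wraparound, which the ports do not model.
def Pre_fire_laser (pla : List (List Int)) (flag : Int) (_line : Int) (_colum : Int) (laserposition : Int) (l : List (List Int)) : Prop :=
  (laserposition = 1 ∨ laserposition = 2 ∨ laserposition = 3 ∨ laserposition = 4) →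
    ((pla.length = 8 ∧ (∀ row ∈ pla, row.length = 10) ∧
      l.length = 8 ∧ (∀ row ∈ l, row.length = 10) ∧
      0 ≤ _line ∧ _line < 8 ∧ 0 ≤ _colum ∧ _colum < 10) ∨
     -- the sweep is empty: the Python loop body never runs and A returns None
     (laserposition = 3 ∧ 8 ≤ _line) ∨ (laserposition = 1 ∧ _line < 0) ∨
     (laserposition = 4 ∧ 10 ≤ _colum) ∨ (laserposition = 2 ∧ _colum < 0))
instance (pla : List (List Int)) (flag : Int) (_line : Int) (_colum : Int) (laserposition : Int) (l : List (List Int)) : Decidable (Pre_fire_laser pla flag _line _colum laserposition l) := by unfold Pre_fire_laser; infer_instance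

def pvWitness_fire_laser : List (List Int) × Int × Int × Int × Int × List (List Int) :=
  (List.replicate 8 (List.replicate 10 (0 : Int)), 7, 2, 3, 3,
   List.replicate 8 (List.replicate 10 (0 : Int)))

def Spec_fire_laser (pla : List (List Int)) (flag : Int) (_line : Int) (_colum : Int) (laserposition : Int) (l : List (List Int)) (out : Option (Int × Int × Int × Int × List (List Int))) : Prop := out = fire_laser_alt pla flag _line _colum laserposition l
instance (pla : List (List Int)) (flag : Int) (_line : Int) (_colum : Int) (laserposition : Int) (l : List (List Int)) (out : Option (Int × Int × Int × Int × List (List Int))) : Decidable (Spec_fire_laser pla flag _line _colum laserposition l out) := by unfold Spec_fire_laser; infer_instance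

-- ===== CLAIM (what is proved, stated in full; the proofs are below) =====
def Claim_equal_fire_laser : Prop := ∀ (pla : List (List Int)) (flag : Int) (_line : Int) (_colum : Int) (laserposition : Int) (l : List (List Int)), Dom_fire_laser pla flag _line _colum laserposition l → Pre_fire_laser pla flag _line _colum laserposition l → Spec_fire_laser pla flag _line _colum laserposition l (fire_laser pla flag _line _colum laserposition l)

-- ===== LEMMAS AND PROOFS =====

theorem pvFindHit_mem (pla : List (List Int)) (_line _colum di dj n : Int) :
    ∀ (ks : List Int) (k : Int), pvFindHit pla _line _colum di dj n ks = some k → k ∈ ks := by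
  intro ks
  induction ks with
  | nil => intro k h; simp [pvFindHit] at h
  | cons x rest ih =>
    intro k h
    rw [pvFindHit] at h
    split at h
    · simp at h; simp [h]
    · exact List.mem_cons_of_mem _ (ih k h)

theorem pvLoop3_eq (pla : List (List Int)) (_line _colum lp : Int) :
    ∀ (m : Nat) (j : Int), (8 - j).toNat ≤ m → _line ≤ j → ∀ (l : List (List Int)),
    pvLoop3 pla _line _colum lp (PySem.List.pyRange j 8 1) (j - _line) l =
    match pvFindHit pla _line _colum 1 0 (8 - _line) (PySem.List.pyRange (j - _line) (8 - _line) 1) with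
    | none => none
    | some k => some (pvCell pla (_line + k * 1) (_colum + k * 0), _line + k * 1, _colum + k * 0, lp,
        (PySem.List.pyRange (j - _line) (k + 1) 1).foldl
          (fun acc k => pvMark acc (_line + k * 1) (_colum + k * 0)) l) := by
  intro m
  induction m with
  | zero =>
    intro j hm hlj l
    rw [PySem.List.pyRange_one_eq_nil (by omega : (8:Int) ≤ j),
        PySem.List.pyRange_one_eq_nil (by omega : 8 - _line ≤ j - _line)]
    simp [pvLoop3, pvFindHit]
  | succ m ih =>
    intro j hm hlj l
    by_cases hj8 : 8 ≤ j
    · rw [PySem.List.pyRange_one_eq_nil hj8,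
          PySem.List.pyRange_one_eq_nil (by omega : 8 - _line ≤ j - _line)]
      simp [pvLoop3, pvFindHit]
    · rw [PySem.List.pyRange_one_cons (by omega : j < 8),
          PySem.List.pyRange_one_cons (by omega : j - _line < 8 - _line)]
      simp only [pvLoop3, pvFindHit]
      have e1 : _line + (j - _line) * 1 = j := by ring
      have e2 : _colum + (j - _line) * 0 = _colum := by ring
      rw [e1, e2]
      have hrec :
          pvLoop3 pla _line _colum lp (PySem.List.pyRange (j + 1) 8 1) (j - _line + 1) (pvMark l j _colum) =
          match pvFindHit pla _line _colum 1 0 (8 - _line) (PySem.List.pyRange (j - _line + 1) (8 - _line) 1) with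
          | none => none
          | some k => some (pvCell pla (_line + k * 1) (_colum + k * 0), _line + k * 1, _colum + k * 0, lp,
              (PySem.List.pyRange (j - _line) (k + 1) 1).foldl
                (fun acc k => pvMark acc (_line + k * 1) (_colum + k * 0)) l) := by
        have h := ih (j + 1) (by omega) (by omega) (pvMark l j _colum)
        rw [show j + 1 - _line = j - _line + 1 by ring] at h
        cases hfind : pvFindHit pla _line _colum 1 0 (8 - _line) (PySem.List.pyRange (j - _line + 1) (8 - _line) 1) with
        | none => rw [hfind] at h; rw [h]
        | some k =>
          have hk : j - _line + 1 ≤ k := by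
            have hmem := pvFindHit_mem pla _line _colum 1 0 (8 - _line) _ k hfind
            exact (PySem.List.mem_pyRange_one.mp hmem).1
          rw [hfind] at h
          rw [h]
          simp
          rw [PySem.List.pyRange_one_cons (by omega : j - _line < k + 1)]
          simp only [List.foldl_cons]
          rw [show _line + (j - _line) = j by ring]
      by_cases hq0 : PySem.Int.mod (pvCell pla j _colum) 100 = 0
      · by_cases hj7 : j = 7
        · rw [show (7:Int) = j from hj7.symm]
          rw [if_pos ⟨by omega, hq0⟩, if_pos (Or.inr ⟨by omega, hq0⟩)]
          simp [PySem.List.pyRange_one_singleton]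
        · rw [if_neg (by rintro ⟨h1, -⟩; exact hj7 (by omega)),
              if_neg (by rintro ⟨h, -⟩; exact h hq0),
              if_neg (by
                rintro (⟨-, h⟩ | ⟨h1, -⟩)
                · exact h hq0
                · exact hj7 (by omega))]
          exact hrec
      · by_cases hjl : j = _line
        · rw [if_neg (by
                rintro ⟨h1, h2⟩
                have h7 : j = 7 := by omega
                rw [h7] at hq0; exact hq0 h2),
              if_neg (by rintro ⟨-, h⟩; exact h hjl),
              if_neg (by
                rintro (⟨h, -⟩ | ⟨-, h2⟩)
                · omega
                · exact hq0 h2)]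
          exact hrec
        · rw [if_neg (by
                rintro ⟨h1, h2⟩
                have h7 : j = 7 := by omega
                rw [h7] at hq0; exact hq0 h2),
              if_pos ⟨hq0, hjl⟩, if_pos (Or.inl ⟨by omega, hq0⟩)]
          simp [PySem.List.pyRange_one_singleton]


theorem pvLoop1_eq (pla : List (List Int)) (_line _colum lp : Int) :
    ∀ (m : Nat) (j : Int), (j + 1).toNat ≤ m → j ≤ _line → ∀ (l : List (List Int)),
    pvLoop1 pla _line _colum lp (PySem.List.pyRange j (-1) (-1)) (_line - j) l =
    match pvFindHit pla _line _colum (-1) 0 (_line + 1) (PySem.List.pyRange (_line - j) (_line + 1) 1) with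
    | none => none
    | some k => some (pvCell pla (_line + k * (-1)) (_colum + k * 0), _line + k * (-1), _colum + k * 0, lp,
        (PySem.List.pyRange (_line - j) (k + 1) 1).foldl
          (fun acc k => pvMark acc (_line + k * (-1)) (_colum + k * 0)) l) := by
  intro m
  induction m with
  | zero =>
    intro j hm hlj l
    rw [PySem.List.pyRange_neg_one_eq_nil (by omega : j ≤ -1),
        PySem.List.pyRange_one_eq_nil (by omega : _line + 1 ≤ _line - j)]
    simp [pvLoop1, pvFindHit]
  | succ m ih =>
    intro j hm hlj l
    by_cases hj8 : j ≤ -1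
    · rw [PySem.List.pyRange_neg_one_eq_nil hj8,
          PySem.List.pyRange_one_eq_nil (by omega : _line + 1 ≤ _line - j)]
      simp [pvLoop1, pvFindHit]
    · rw [PySem.List.pyRange_neg_one_cons (by omega : (-1:Int) < j),
          PySem.List.pyRange_one_cons (by omega : _line - j < _line + 1)]
      simp only [pvLoop1, pvFindHit]
      have e1 : _line + (_line - j) * (-1) = j := by ring
      have e2 : _colum + (_line - j) * 0 = _colum := by ring
      rw [e1, e2]
      have hrec :
          pvLoop1 pla _line _colum lp (PySem.List.pyRange (j - 1) (-1) (-1)) (_line - j + 1) (pvMark l j _colum) =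
          match pvFindHit pla _line _colum (-1) 0 (_line + 1) (PySem.List.pyRange (_line - j + 1) (_line + 1) 1) with
          | none => none
          | some k => some (pvCell pla (_line + k * (-1)) (_colum + k * 0), _line + k * (-1), _colum + k * 0, lp,
              (PySem.List.pyRange (_line - j) (k + 1) 1).foldl
                (fun acc k => pvMark acc (_line + k * (-1)) (_colum + k * 0)) l) := by
        have h := ih (j - 1) (by omega) (by omega) (pvMark l j _colum)
        rw [show _line - (j - 1) = _line - j + 1 by ring] at h
        cases hfind : pvFindHit pla _line _colum (-1) 0 (_line + 1) (PySem.List.pyRange (_line - j + 1) (_line + 1) 1) with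
        | none => rw [hfind] at h; rw [h]
        | some k =>
          have hk : _line - j + 1 ≤ k := by
            have hmem := pvFindHit_mem pla _line _colum (-1) 0 (_line + 1) _ k hfind
            exact (PySem.List.mem_pyRange_one.mp hmem).1
          rw [hfind] at h
          rw [h]
          simp
          rw [PySem.List.pyRange_one_cons (by omega : _line - j < k + 1)]
          simp only [List.foldl_cons]
          rw [show _line + -(_line - j) = j by ring]
      by_cases hq0 : PySem.Int.mod (pvCell pla j _colum) 100 = 0
      · by_cases hj7 : j = 0
        · rw [hj7] at hq0 ⊢
          rw [if_pos ⟨by omega, hq0⟩, if_pos (Or.inr ⟨by omega, hq0⟩)]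
          simp [PySem.List.pyRange_one_singleton]
        · rw [if_neg (by rintro ⟨h1, -⟩; exact hj7 (by omega)),
              if_neg (by rintro ⟨h, -⟩; exact h hq0),
              if_neg (by
                rintro (⟨-, h⟩ | ⟨h1, -⟩)
                · exact h hq0
                · exact hj7 (by omega))]
          exact hrec
      · by_cases hjl : j = _line
        · rw [if_neg (by
                rintro ⟨h1, h2⟩
                have h7 : j = 0 := by omega
                rw [h7] at hq0; exact hq0 h2),
              if_neg (by rintro ⟨-, h⟩; exact h hjl),
              if_neg (by
                rintro (⟨h, -⟩ | ⟨-, h2⟩)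
                · omega
                · exact hq0 h2)]
          exact hrec
        · rw [if_neg (by
                rintro ⟨h1, h2⟩
                have h7 : j = 0 := by omega
                rw [h7] at hq0; exact hq0 h2),
              if_pos ⟨hq0, hjl⟩, if_pos (Or.inl ⟨by omega, hq0⟩)]
          simp [PySem.List.pyRange_one_singleton]

theorem pvLoop4_eq (pla : List (List Int)) (_line _colum lp : Int) :
    ∀ (m : Nat) (j : Int), (10 - j).toNat ≤ m → _colum ≤ j → ∀ (l : List (List Int)),
    pvLoop4 pla _line _colum lp (PySem.List.pyRange j 10 1) (j - _colum) l =
    match pvFindHit pla _line _colum 0 1 (10 - _colum) (PySem.List.pyRange (j - _colum) (10 - _colum) 1) with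
    | none => none
    | some k => some (pvCell pla (_line + k * 0) (_colum + k * 1), _line + k * 0, _colum + k * 1, lp,
        (PySem.List.pyRange (j - _colum) (k + 1) 1).foldl
          (fun acc k => pvMark acc (_line + k * 0) (_colum + k * 1)) l) := by
  intro m
  induction m with
  | zero =>
    intro j hm hlj l
    rw [PySem.List.pyRange_one_eq_nil (by omega : (10:Int) ≤ j),
        PySem.List.pyRange_one_eq_nil (by omega : 10 - _colum ≤ j - _colum)]
    simp [pvLoop4, pvFindHit]
  | succ m ih =>
    intro j hm hlj l
    by_cases hj8 : 10 ≤ j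
    · rw [PySem.List.pyRange_one_eq_nil hj8,
          PySem.List.pyRange_one_eq_nil (by omega : 10 - _colum ≤ j - _colum)]
      simp [pvLoop4, pvFindHit]
    · rw [PySem.List.pyRange_one_cons (by omega : j < 10),
          PySem.List.pyRange_one_cons (by omega : j - _colum < 10 - _colum)]
      simp only [pvLoop4, pvFindHit]
      have e1 : _line + (j - _colum) * 0 = _line := by ring
      have e2 : _colum + (j - _colum) * 1 = j := by ring
      rw [e1, e2]
      have hrec :
          pvLoop4 pla _line _colum lp (PySem.List.pyRange (j + 1) 10 1) (j - _colum + 1) (pvMark l _line j) =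
          match pvFindHit pla _line _colum 0 1 (10 - _colum) (PySem.List.pyRange (j - _colum + 1) (10 - _colum) 1) with
          | none => none
          | some k => some (pvCell pla (_line + k * 0) (_colum + k * 1), _line + k * 0, _colum + k * 1, lp,
              (PySem.List.pyRange (j - _colum) (k + 1) 1).foldl
                (fun acc k => pvMark acc (_line + k * 0) (_colum + k * 1)) l) := by
        have h := ih (j + 1) (by omega) (by omega) (pvMark l _line j)
        rw [show j + 1 - _colum = j - _colum + 1 by ring] at h
        cases hfind : pvFindHit pla _line _colum 0 1 (10 - _colum) (PySem.List.pyRange (j - _colum + 1) (10 - _colum) 1) with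
        | none => rw [hfind] at h; rw [h]
        | some k =>
          have hk : j - _colum + 1 ≤ k := by
            have hmem := pvFindHit_mem pla _line _colum 0 1 (10 - _colum) _ k hfind
            exact (PySem.List.mem_pyRange_one.mp hmem).1
          rw [hfind] at h
          rw [h]
          simp
          rw [PySem.List.pyRange_one_cons (by omega : j - _colum < k + 1)]
          simp only [List.foldl_cons]
          rw [show _colum + (j - _colum) = j by ring]
      by_cases hq0 : PySem.Int.mod (pvCell pla _line j) 100 = 0
      · by_cases hj7 : j = 9
        · rw [show (9:Int) = j from hj7.symm]
          rw [if_pos ⟨by omega, hq0⟩, if_pos (Or.inr ⟨by omega, hq0⟩)]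
          simp [PySem.List.pyRange_one_singleton]
        · rw [if_neg (by rintro ⟨h1, -⟩; exact hj7 (by omega)),
              if_neg (by rintro ⟨h, -⟩; exact h hq0),
              if_neg (by
                rintro (⟨-, h⟩ | ⟨h1, -⟩)
                · exact h hq0
                · exact hj7 (by omega))]
          exact hrec
      · by_cases hjl : j = _colum
        · rw [if_neg (by
                rintro ⟨h1, h2⟩
                have h7 : j = 9 := by omega
                rw [h7] at hq0; exact hq0 h2),
              if_neg (by rintro ⟨-, h⟩; exact h hjl),
              if_neg (by
                rintro (⟨h, -⟩ | ⟨-, h2⟩)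
                · omega
                · exact hq0 h2)]
          exact hrec
        · rw [if_neg (by
                rintro ⟨h1, h2⟩
                have h7 : j = 9 := by omega
                rw [h7] at hq0; exact hq0 h2),
              if_pos ⟨hq0, hjl⟩, if_pos (Or.inl ⟨by omega, hq0⟩)]
          simp [PySem.List.pyRange_one_singleton]

theorem pvLoop2_eq (pla : List (List Int)) (_line _colum lp : Int) :
    ∀ (m : Nat) (j : Int), (j + 1).toNat ≤ m → j ≤ _colum → ∀ (l : List (List Int)),
    pvLoop2 pla _line _colum lp (PySem.List.pyRange j (-1) (-1)) (_colum - j) l =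
    match pvFindHit pla _line _colum 0 (-1) (_colum + 1) (PySem.List.pyRange (_colum - j) (_colum + 1) 1) with
    | none => none
    | some k => some (pvCell pla (_line + k * 0) (_colum + k * (-1)), _line + k * 0, _colum + k * (-1), lp,
        (PySem.List.pyRange (_colum - j) (k + 1) 1).foldl
          (fun acc k => pvMark acc (_line + k * 0) (_colum + k * (-1))) l) := by
  intro m
  induction m with
  | zero =>
    intro j hm hlj l
    rw [PySem.List.pyRange_neg_one_eq_nil (by omega : j ≤ -1),
        PySem.List.pyRange_one_eq_nil (by omega : _colum + 1 ≤ _colum - j)]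
    simp [pvLoop2, pvFindHit]
  | succ m ih =>
    intro j hm hlj l
    by_cases hj8 : j ≤ -1
    · rw [PySem.List.pyRange_neg_one_eq_nil hj8,
          PySem.List.pyRange_one_eq_nil (by omega : _colum + 1 ≤ _colum - j)]
      simp [pvLoop2, pvFindHit]
    · rw [PySem.List.pyRange_neg_one_cons (by omega : (-1:Int) < j),
          PySem.List.pyRange_one_cons (by omega : _colum - j < _colum + 1)]
      simp only [pvLoop2, pvFindHit]
      have e1 : _line + (_colum - j) * 0 = _line := by ring
      have e2 : _colum + (_colum - j) * (-1) = j := by ring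
      rw [e1, e2]
      have hrec :
          pvLoop2 pla _line _colum lp (PySem.List.pyRange (j - 1) (-1) (-1)) (_colum - j + 1) (pvMark l _line j) =
          match pvFindHit pla _line _colum 0 (-1) (_colum + 1) (PySem.List.pyRange (_colum - j + 1) (_colum + 1) 1) with
          | none => none
          | some k => some (pvCell pla (_line + k * 0) (_colum + k * (-1)), _line + k * 0, _colum + k * (-1), lp,
              (PySem.List.pyRange (_colum - j) (k + 1) 1).foldl
                (fun acc k => pvMark acc (_line + k * 0) (_colum + k * (-1))) l) := by
        have h := ih (j - 1) (by omega) (by omega) (pvMark l _line j)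
        rw [show _colum - (j - 1) = _colum - j + 1 by ring] at h
        cases hfind : pvFindHit pla _line _colum 0 (-1) (_colum + 1) (PySem.List.pyRange (_colum - j + 1) (_colum + 1) 1) with
        | none => rw [hfind] at h; rw [h]
        | some k =>
          have hk : _colum - j + 1 ≤ k := by
            have hmem := pvFindHit_mem pla _line _colum 0 (-1) (_colum + 1) _ k hfind
            exact (PySem.List.mem_pyRange_one.mp hmem).1
          rw [hfind] at h
          rw [h]
          simp
          rw [PySem.List.pyRange_one_cons (by omega : _colum - j < k + 1)]
          simp only [List.foldl_cons]
          rw [show _colum + -(_colum - j) = j by ring]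
      by_cases hq0 : PySem.Int.mod (pvCell pla _line j) 100 = 0
      · by_cases hj7 : j = 0
        · rw [hj7] at hq0 ⊢
          rw [if_pos ⟨by omega, hq0⟩, if_pos (Or.inr ⟨by omega, hq0⟩)]
          simp [PySem.List.pyRange_one_singleton]
        · rw [if_neg (by rintro ⟨h1, -⟩; exact hj7 (by omega)),
              if_neg (by rintro ⟨h, -⟩; exact h hq0),
              if_neg (by
                rintro (⟨-, h⟩ | ⟨h1, -⟩)
                · exact h hq0
                · exact hj7 (by omega))]
          exact hrec
      · by_cases hjl : j = _colum
        · rw [if_neg (by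
                rintro ⟨h1, h2⟩
                have h7 : j = 0 := by omega
                rw [h7] at hq0; exact hq0 h2),
              if_neg (by rintro ⟨-, h⟩; exact h hjl),
              if_neg (by
                rintro (⟨h, -⟩ | ⟨-, h2⟩)
                · omega
                · exact hq0 h2)]
          exact hrec
        · rw [if_neg (by
                rintro ⟨h1, h2⟩
                have h7 : j = 0 := by omega
                rw [h7] at hq0; exact hq0 h2),
              if_pos ⟨hq0, hjl⟩, if_pos (Or.inl ⟨by omega, hq0⟩)]
          simp [PySem.List.pyRange_one_singleton]

-- ===== VERDICT (by name: the statement is the Claim_ definition above) =====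
theorem fire_laser_spec : Claim_equal_fire_laser := by
  unfold Claim_equal_fire_laser
  intro pla flag _line _colum laserposition l hdom hpre
  unfold Spec_fire_laser
  by_cases h3 : laserposition = 3
  · subst h3
    have key := pvLoop3_eq pla _line _colum 3 ((8 - _line).toNat) _line le_rfl le_rfl l
    rw [show _line - _line = (0:Int) by ring] at key
    simp only [fire_laser, fire_laser_alt]
    norm_num
    rw [key]
    cases hfind : pvFindHit pla _line _colum 1 0 (8 - _line) (PySem.List.pyRange 0 (8 - _line) 1) with
    | none => simp
    | some k => simp
  · by_cases h1 : laserposition = 1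
    · subst h1
      have key := pvLoop1_eq pla _line _colum 1 ((_line + 1).toNat) _line le_rfl le_rfl l
      rw [show _line - _line = (0:Int) by ring] at key
      simp only [fire_laser, fire_laser_alt]
      norm_num
      rw [key]
      cases hfind : pvFindHit pla _line _colum (-1) 0 (_line + 1) (PySem.List.pyRange 0 (_line + 1) 1) with
      | none => simp
      | some k => simp
    · by_cases h4 : laserposition = 4
      · subst h4
        have key := pvLoop4_eq pla _line _colum 4 ((10 - _colum).toNat) _colum le_rfl le_rfl l
        rw [show _colum - _colum = (0:Int) by ring] at key
        simp only [fire_laser, fire_laser_alt]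
        norm_num
        rw [key]
        cases hfind : pvFindHit pla _line _colum 0 1 (10 - _colum) (PySem.List.pyRange 0 (10 - _colum) 1) with
        | none => simp
        | some k => simp
      · by_cases h2 : laserposition = 2
        · subst h2
          have key := pvLoop2_eq pla _line _colum 2 ((_colum + 1).toNat) _colum le_rfl le_rfl l
          rw [show _colum - _colum = (0:Int) by ring] at key
          simp only [fire_laser, fire_laser_alt]
          norm_num
          rw [key]
          cases hfind : pvFindHit pla _line _colum 0 (-1) (_colum + 1) (PySem.List.pyRange 0 (_colum + 1) 1) with
          | none => simp
          | some k => simp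
        · simp [fire_laser, fire_laser_alt, h1, h2, h3, h4]
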